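-- pv_equiv track=rewrite | github.com/yoan1601/SARDINAS_IA | web/sardinas.py | compute_num_state_changes
-- ===== SOURCE A (Python) =====
-- def compute_num_state_changes(language):
--   current_state = 0
--   num_state_changes = 0
--   for word in language:
--     for char in word:
--       if char == "0":
--         if current_state == 1:
--           num_state_changes += 1
--           current_state = 0
--       else:
--         if current_state == 0:
--           num_state_changes += 1
--           current_state = 1
--   return num_state_changes
-- ===== SOURCE B (Python) =====
-- def compute_num_state_changes(language):
--     # Flatten to bits, collapse into runs of equal bits, then count:
--     # R runs cost R changes if the first run is a 1-run, else R-1 (start state is 0).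
--     bits = [c != "0" for word in language for c in word]
--     if not bits:
--         return 0
--     runs = [bits[0]] + [b for p, b in zip(bits, bits[1:]) if p != b]
--     return len(runs) if runs[0] else len(runs) - 1
-- ===== Notes on version B (the rewrite author's own statement) =====
-- stated objective: alternative
-- what changed: Replaces the per-character running-state accumulator with a two-phase decomposition: flatten all characters to bits, extract maximal runs via an adjacent-pair zip, and compute the answer from the run count and the first run's value.
import Mathlib
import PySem

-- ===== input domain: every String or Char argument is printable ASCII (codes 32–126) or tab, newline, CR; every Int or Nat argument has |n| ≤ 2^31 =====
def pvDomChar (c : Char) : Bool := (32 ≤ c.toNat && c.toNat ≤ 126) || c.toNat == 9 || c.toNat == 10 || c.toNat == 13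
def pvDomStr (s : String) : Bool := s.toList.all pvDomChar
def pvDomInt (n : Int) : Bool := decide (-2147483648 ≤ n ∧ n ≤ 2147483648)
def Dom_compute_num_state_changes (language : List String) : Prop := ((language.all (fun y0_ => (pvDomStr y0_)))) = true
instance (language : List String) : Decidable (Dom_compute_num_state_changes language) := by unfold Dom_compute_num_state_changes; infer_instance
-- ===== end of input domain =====

-- B replaces A's per-character running-state accumulator by a flatten-to-bits,
-- extract-maximal-runs-then-count decomposition (alternative, same cost).


-- ===== PORT A =====
-- one character step of A's inner loop: state = (current_state, num_state_changes)
def pvStepA (st : Int × Int) (char : Char) : Int × Int :=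
  if char = '0' then
    (if st.1 = 1 then (0, st.2 + 1) else st)
  else
    (if st.1 = 0 then (1, st.2 + 1) else st)

def compute_num_state_changes (language : List String) : Int :=
  (language.foldl (fun st word => word.toList.foldl pvStepA st) ((0 : Int), (0 : Int))).2

-- ===== PORT B =====
def compute_num_state_changes_alt (language : List String) : Int :=
  let bits := language.flatMap (fun word => word.toList.map (fun c => decide (c ≠ '0')))
  match bits with
  | [] => 0
  | b0 :: rest =>
    let runs := b0 :: (((b0 :: rest).zip rest).filter (fun p => p.1 ≠ p.2)).map Prod.snd
    if runs[0]! then (runs.length : Int) else (runs.length : Int) - 1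

-- ===== PRECONDITION & SPEC =====
def Spec_compute_num_state_changes (language : List String) (out : Int) : Prop := out = compute_num_state_changes_alt language
instance (language : List String) (out : Int) : Decidable (Spec_compute_num_state_changes language out) := by unfold Spec_compute_num_state_changes; infer_instance

-- ===== CLAIM (what is proved, stated in full; the proofs are below) =====
def Claim_equal_compute_num_state_changes : Prop := ∀ (language : List String), Dom_compute_num_state_changes language → Spec_compute_num_state_changes language (compute_num_state_changes language)

-- ===== LEMMAS AND PROOFS =====

-- canonical change count of a bit list from start state s
def pvCanon (s : Bool) : List Bool → Nat
  | [] => 0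
  | b :: t => (if b ≠ s then 1 else 0) + pvCanon b t

-- A's fold over the whole language is the fold over the flattened character list
theorem pvA_flatten (language : List String) (st : Int × Int) :
    language.foldl (fun st word => word.toList.foldl pvStepA st) st
      = (language.flatMap (fun w => w.toList)).foldl pvStepA st := by
  induction language generalizing st with
  | nil => rfl
  | cons w t ih => simp [List.flatMap_cons, List.foldl_append, ih]

-- A's character fold computes pvCanon (second component) from a 0/1-encoded state
theorem pvA_fold (cs : List Char) (s : Bool) (k : Int) :
    (cs.foldl pvStepA ((if s then 1 else 0), k)).2
      = k + (pvCanon s (cs.map (fun c => decide (c ≠ '0'))) : Int) := by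
  induction cs generalizing s k with
  | nil => simp [pvCanon]
  | cons c t ih =>
    have hstep : pvStepA ((if s then 1 else 0), k) c
        = ((if decide (c ≠ '0') then 1 else 0),
           k + (if decide (c ≠ '0') ≠ s then 1 else 0)) := by
      by_cases hc : c = '0' <;> cases s <;> simp [pvStepA, hc]
    rw [List.foldl_cons, hstep, ih]
    simp [pvCanon]
    ring

-- B's run count: adjacent-difference pairs of b0::rest count pvCanon b0 rest
theorem pvB_runs (rest : List Bool) (b0 : Bool) :
    (((b0 :: rest).zip rest).filter (fun p => p.1 ≠ p.2)).length
      = pvCanon b0 rest := by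
  induction rest generalizing b0 with
  | nil => rfl
  | cons b t ih =>
    have hb := ih b
    by_cases h : b = b0
    · subst h
      simpa [List.zip_cons_cons, pvCanon] using hb
    · simp [List.zip_cons_cons, List.filter_cons, pvCanon, h, eq_comm] at hb ⊢
      omega

-- ===== VERDICT (by name: the statement is the Claim_ definition above) =====
theorem compute_num_state_changes_spec : Claim_equal_compute_num_state_changes := by
  intro language _
  unfold Spec_compute_num_state_changes compute_num_state_changes compute_num_state_changes_alt
  rw [pvA_flatten]
  have hmap : (language.flatMap fun w => w.toList).map (fun c => decide (c ≠ '0'))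
      = language.flatMap (fun word => word.toList.map (fun c => decide (c ≠ '0'))) := by
    simp [List.map_flatMap]
  rcases hbits : language.flatMap (fun word => word.toList.map (fun c => decide (c ≠ '0'))) with _ | ⟨b0, rest⟩
  · -- no characters at all: the flattened char list is empty too
    have hflat : (language.flatMap fun w => w.toList) = [] :=
      List.map_eq_nil_iff.mp (hmap.trans hbits)
    rw [hflat]
    simp only [hbits, List.foldl_nil]
  · have h0 : (language.flatMap fun w => w.toList).foldl pvStepA ((0 : Int), 0)
        = (language.flatMap fun w => w.toList).foldl pvStepA ((if false then 1 else 0), 0) := by rfl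
    rw [h0, pvA_fold, hmap, hbits]
    simp only [List.getElem!_cons_zero, List.length_cons, List.length_map, pvB_runs]
    cases b0 <;> simp [pvCanon] <;> ring
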